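-- pv_equiv track=rewrite | github.com/lonly197/datus-agent | datus/tools/func_tool/database.py | _assess_business_conflict
-- ===== SOURCE A (Python) =====
-- from typing import Any, Callable, Dict, Iterable, List, Optional, Sequence
--
-- def _assess_business_conflict(target: Dict[str, Any], candidate: Dict[str, Any]) -> str:
--     """Assess business logic conflicts (simplified version)."""
--     target_name = target.get("table_name", "").lower()
--     candidate_name = candidate.get("table_name", "").lower()
--
--     # Simple heuristic: similar names often indicate similar business purpose
--     if "fact" in target_name and "fact" in candidate_name:
--         return "可能存在事实表重复建设"
--     elif "dim" in target_name and "dim" in candidate_name: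
--         return "可能存在维度表重复建设"
--     elif any(keyword in target_name for keyword in ["user", "customer", "client"]) and any(
--         keyword in candidate_name for keyword in ["user", "customer", "client"]
--     ):
--         return "可能存在用户相关数据重复"
--
--     return "表结构相似，建议进一步评估业务需求"
-- ===== SOURCE B (Python) =====
-- from typing import Any, Dict
--
-- # category -> (keywords indicating it, conflict message)
-- _CATEGORY_INFO = {
--     "fact": (["fact"], "可能存在事实表重复建设"),
--     "dim": (["dim"], "可能存在维度表重复建设"),
--     "user": (["user", "customer", "client"], "可能存在用户相关数据重复"),
-- }
-- _PRIORITY = ["fact", "dim", "user"]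
--
-- def _classify(name: str) -> set:
--     """Set of business categories a table name belongs to."""
--     return {cat for cat, (keywords, _) in _CATEGORY_INFO.items()
--             if any(k in name for k in keywords)}
--
-- def _assess_business_conflict(target: Dict[str, Any], candidate: Dict[str, Any]) -> str:
--     """Classify each table independently, then report the top shared category."""
--     shared = _classify(target.get("table_name", "").lower()) & \
--              _classify(candidate.get("table_name", "").lower())
--     for cat in _PRIORITY:
--         if cat in shared:
--             return _CATEGORY_INFO[cat][1]
--     return "表结构相似，建议进一步评估业务需求"
-- ===== Notes on version B (the rewrite author's own statement) =====
-- stated objective: alternative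
-- what changed: B classifies each table name independently into a set of business categories (fact/dim/user), intersects the two category sets, and returns the message of the highest-priority shared category, instead of A's pairwise if/elif keyword checks over both names.
import Mathlib
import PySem

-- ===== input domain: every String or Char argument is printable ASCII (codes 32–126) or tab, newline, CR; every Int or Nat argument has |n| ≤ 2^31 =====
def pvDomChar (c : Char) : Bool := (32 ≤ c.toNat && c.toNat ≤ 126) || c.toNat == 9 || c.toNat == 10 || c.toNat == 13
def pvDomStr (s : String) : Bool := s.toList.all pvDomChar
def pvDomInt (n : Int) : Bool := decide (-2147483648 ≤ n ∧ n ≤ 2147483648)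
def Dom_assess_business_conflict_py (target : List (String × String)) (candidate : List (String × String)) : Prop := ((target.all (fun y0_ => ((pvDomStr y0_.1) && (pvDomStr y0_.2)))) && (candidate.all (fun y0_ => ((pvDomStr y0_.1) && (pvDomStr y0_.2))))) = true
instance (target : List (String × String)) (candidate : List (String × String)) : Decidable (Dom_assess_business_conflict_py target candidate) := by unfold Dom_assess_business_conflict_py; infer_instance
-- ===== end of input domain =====

-- B classifies each table name independently into a set of business categories, intersects
-- the two sets, and reports the highest-priority shared category (alternative decomposition;
-- same cost, names are never compared pairwise rule-by-rule).

-- ===== PORT A =====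
def assess_business_conflict_py (target : List (String × String)) (candidate : List (String × String)) : String :=
  let target_name := PySem.Str.lower (((List.lookup "table_name" target).getD ""))
  let candidate_name := PySem.Str.lower (((List.lookup "table_name" candidate).getD ""))
  if PySem.Str.isIn "fact" target_name && PySem.Str.isIn "fact" candidate_name then
    "可能存在事实表重复建设"
  else if PySem.Str.isIn "dim" target_name && PySem.Str.isIn "dim" candidate_name then
    "可能存在维度表重复建设"
  else if (["user", "customer", "client"].any fun keyword => PySem.Str.isIn keyword target_name) &&
          (["user", "customer", "client"].any fun keyword => PySem.Str.isIn keyword candidate_name) then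
    "可能存在用户相关数据重复"
  else
    "表结构相似，建议进一步评估业务需求"

-- ===== PORT B =====
-- _CATEGORY_INFO: category -> (keywords, message), insertion order
def pvCategoryInfo : List (String × (List String × String)) :=
  [ ("fact", (["fact"], "可能存在事实表重复建设")),
    ("dim", (["dim"], "可能存在维度表重复建设")),
    ("user", (["user", "customer", "client"], "可能存在用户相关数据重复")) ]

def pvPriority : List String := ["fact", "dim", "user"]

-- _classify(name): set of categories whose keywords occur in name
def pvClassify (name : String) : PySem.Set String :=
  PySem.Set.ofList
    ((pvCategoryInfo.filter (fun r => r.2.1.any (fun k => PySem.Str.isIn k name))).map (·.1))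

-- the final 'for cat in _PRIORITY: if cat in shared: return …' loop
def pvPickShared (shared : PySem.Set String) : List String → String
  | [] => "表结构相似，建议进一步评估业务需求"
  | cat :: rest =>
      if PySem.Set.contains shared cat then ((List.lookup cat pvCategoryInfo).getD ([], "")).2
      else pvPickShared shared rest

def assess_business_conflict_py_alt (target : List (String × String)) (candidate : List (String × String)) : String :=
  let shared := PySem.Set.inter
    (pvClassify (PySem.Str.lower (((List.lookup "table_name" target).getD ""))))
    (pvClassify (PySem.Str.lower (((List.lookup "table_name" candidate).getD ""))))
  pvPickShared shared pvPriority

-- ===== PRECONDITION & SPEC =====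
def Spec_assess_business_conflict_py (target : List (String × String)) (candidate : List (String × String)) (out : String) : Prop := out = assess_business_conflict_py_alt target candidate
instance (target : List (String × String)) (candidate : List (String × String)) (out : String) : Decidable (Spec_assess_business_conflict_py target candidate out) := by unfold Spec_assess_business_conflict_py; infer_instance

-- ===== CLAIM (what is proved, stated in full; the proofs are below) =====
def Claim_equal_assess_business_conflict_py : Prop := ∀ (target : List (String × String)) (candidate : List (String × String)), Dom_assess_business_conflict_py target candidate → Spec_assess_business_conflict_py target candidate (assess_business_conflict_py target candidate)

-- ===== LEMMAS AND PROOFS =====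
-- Both sides depend only on six keyword-membership Booleans of the two lowered names;
-- generalize those atoms and finish by exhaustive Boolean case analysis (decide).
theorem assess_business_conflict_py_spec : Claim_equal_assess_business_conflict_py := by
  intro target candidate _
  unfold Spec_assess_business_conflict_py assess_business_conflict_py assess_business_conflict_py_alt
  simp only [pvClassify, pvCategoryInfo, pvPriority, List.filter_cons, List.filter_nil,
    List.any_cons, List.any_nil, Bool.or_false]
  generalize PySem.Str.isIn "fact" (PySem.Str.lower (((List.lookup "table_name" target).getD ""))) = a1
  generalize PySem.Str.isIn "fact" (PySem.Str.lower (((List.lookup "table_name" candidate).getD ""))) = a2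
  generalize PySem.Str.isIn "dim" (PySem.Str.lower (((List.lookup "table_name" target).getD ""))) = b1
  generalize PySem.Str.isIn "dim" (PySem.Str.lower (((List.lookup "table_name" candidate).getD ""))) = b2
  generalize (PySem.Str.isIn "user" (PySem.Str.lower (((List.lookup "table_name" target).getD ""))) ||
      (PySem.Str.isIn "customer" (PySem.Str.lower (((List.lookup "table_name" target).getD ""))) ||
       PySem.Str.isIn "client" (PySem.Str.lower (((List.lookup "table_name" target).getD ""))))) = c1
  generalize (PySem.Str.isIn "user" (PySem.Str.lower (((List.lookup "table_name" candidate).getD ""))) ||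
      (PySem.Str.isIn "customer" (PySem.Str.lower (((List.lookup "table_name" candidate).getD ""))) ||
       PySem.Str.isIn "client" (PySem.Str.lower (((List.lookup "table_name" candidate).getD ""))))) = c2
  revert a1 a2 b1 b2 c1 c2
  decide

-- ===== VERDICT (by name: the statement is the Claim_ definition above) =====
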